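-- pv_equiv track=rewrite | github.com/la-moss/KubeClaw | scripts/ci_scale_noise_check.py | count_observed_facts
-- ===== SOURCE A (Python) =====
-- def count_observed_facts(report_output: str) -> int:
--     lines = report_output.splitlines()
--     in_facts = False
--     count = 0
--     for line in lines:
--         stripped = line.strip()
--         if stripped == "2) Observed facts":
--             in_facts = True
--             continue
--         if in_facts and stripped == "3) Interpretation":
--             break
--         if in_facts and stripped.startswith("- "):
--             count += 1
--     return count
-- ===== SOURCE B (Python) =====
-- def count_observed_facts(report_output: str) -> int:
--     lines = [line.strip() for line in report_output.splitlines()]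
--     try:
--         start = lines.index("2) Observed facts")
--     except ValueError:
--         return 0
--     try:
--         end = lines.index("3) Interpretation", start + 1)
--     except ValueError:
--         end = len(lines)
--     return sum(1 for s in lines[start + 1:end] if s.startswith("- "))
-- ===== Notes on version B (the rewrite author's own statement) =====
-- stated objective: alternative
-- what changed: Replaces the stateful single-pass flag loop with explicit boundary location (list.index for the section start and end) followed by a separate counting pass over the sliced section.
import Mathlib
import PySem

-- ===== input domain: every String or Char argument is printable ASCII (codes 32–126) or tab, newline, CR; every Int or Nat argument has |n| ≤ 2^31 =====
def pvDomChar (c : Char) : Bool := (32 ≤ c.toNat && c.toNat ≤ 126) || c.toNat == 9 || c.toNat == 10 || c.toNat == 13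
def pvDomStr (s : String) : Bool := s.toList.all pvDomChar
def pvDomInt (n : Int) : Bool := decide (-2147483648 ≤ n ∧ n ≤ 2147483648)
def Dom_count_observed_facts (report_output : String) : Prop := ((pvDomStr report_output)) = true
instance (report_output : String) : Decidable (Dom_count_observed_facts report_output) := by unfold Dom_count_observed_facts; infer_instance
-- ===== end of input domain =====

-- B replaces A's stateful single-pass flag loop by explicit boundary location (index of the
-- section start and end markers) plus a separate counting pass over the sliced section.

-- ===== PORT A =====
-- the for-loop of A: state = (in_facts, count); the 'break' returns count immediately
def cofLoopA : List String → Bool → Int → Int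
  | [], _, count => count
  | line :: rest, in_facts, count =>
    let stripped := PySem.Str.strip line
    if stripped = "2) Observed facts" then cofLoopA rest true count
    else if in_facts ∧ stripped = "3) Interpretation" then count
    else if in_facts ∧ PySem.Str.startswith stripped "- " then cofLoopA rest in_facts (count + 1)
    else cofLoopA rest in_facts count

def count_observed_facts (report_output : String) : Int :=
  cofLoopA (PySem.Str.splitlines report_output) false 0

-- ===== PORT B =====
-- sum(1 for s in section if s.startswith("- "))
def cofBullets (xs : List String) : Int :=
  ((xs.countP (fun s => PySem.Str.startswith s "- ")) : Int)

def count_observed_facts_alt (report_output : String) : Int :=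
  let lines := (PySem.Str.splitlines report_output).map PySem.Str.strip
  match PySem.List.index? lines "2) Observed facts" with
  | none => 0   -- lines.index raised ValueError: no facts section
  | some start =>
    -- lines.index("3) Interpretation", start+1) with fallback len(lines); the slice
    -- lines[start+1:end] is (lines.drop (start+1)).take (end-(start+1)), computed relative to the tail
    let tail := lines.drop (start + 1)
    let endRel := (PySem.List.index? tail "3) Interpretation").getD tail.length
    cofBullets (tail.take endRel)

-- ===== PRECONDITION & SPEC =====
def Spec_count_observed_facts (report_output : String) (out : Int) : Prop := out = count_observed_facts_alt report_output
instance (report_output : String) (out : Int) : Decidable (Spec_count_observed_facts report_output out) := by unfold Spec_count_observed_facts; infer_instance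

-- ===== CLAIM (what is proved, stated in full; the proofs are below) =====
def Claim_equal_count_observed_facts : Prop := ∀ (report_output : String), Dom_count_observed_facts report_output → Spec_count_observed_facts report_output (count_observed_facts report_output)

-- ===== LEMMAS AND PROOFS =====

-- B's computation on the pre-stripped line list
def cofAltCore (lines : List String) : Int :=
  match PySem.List.index? lines "2) Observed facts" with
  | none => 0
  | some start =>
    let tail := lines.drop (start + 1)
    let endRel := (PySem.List.index? tail "3) Interpretation").getD tail.length
    cofBullets (tail.take endRel)

lemma alt_eq_core (r : String) :
    count_observed_facts_alt r = cofAltCore ((PySem.Str.splitlines r).map PySem.Str.strip) := rfl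

lemma cofBullets_cons (s : String) (t : List String) :
    cofBullets (s :: t) = (if PySem.Str.startswith s "- " then 1 else 0) + cofBullets t := by
  simp only [cofBullets, List.countP_cons]
  split_ifs with h
  · simp; ring
  · simp

-- in-facts phase: from state true, A returns c plus the bullets before the first end marker
lemma cofLoopA_true (ls : List String) : ∀ (c : Int),
    cofLoopA ls true c =
      c + cofBullets ((ls.map PySem.Str.strip).take
        ((PySem.List.index? (ls.map PySem.Str.strip) "3) Interpretation").getD ls.length)) := by
  induction ls with
  | nil => intro c; simp [cofLoopA, cofBullets]
  | cons l rest ih =>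
    intro c
    simp only [List.map_cons, List.length_cons]
    by_cases h2 : PySem.Str.strip l = "3) Interpretation"
    · have h1 : PySem.Str.strip l ≠ "2) Observed facts" := by rw [h2]; decide
      rw [show cofLoopA (l :: rest) true c = c by simp [cofLoopA, h1, h2], h2,
        PySem.List.index?_cons_self]
      simp [cofBullets]
    · rw [PySem.List.index?_cons_of_ne _ h2]
      cases hidx : PySem.List.index? (rest.map PySem.Str.strip) "3) Interpretation" with
      | none =>
        simp only [hidx, Option.map_none, Option.getD_none]
        rw [show rest.length + 1 = (rest.map PySem.Str.strip).length + 1 by simp,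
          List.take_succ_cons, cofBullets_cons]
        by_cases h1 : PySem.Str.strip l = "2) Observed facts"
        · rw [show cofLoopA (l :: rest) true c = cofLoopA rest true c by simp [cofLoopA, h1],
            ih, hidx, h1]
          simp
          decide
        · rw [show cofLoopA (l :: rest) true c =
              (if PySem.Str.startswith (PySem.Str.strip l) "- " then cofLoopA rest true (c + 1)
               else cofLoopA rest true c) by
            simp only [cofLoopA, h1, if_false, h2]
            split_ifs <;> simp_all]
          split_ifs with hb <;> rw [ih, hidx] <;> simp [hb] <;> ring
      | some k =>
        simp only [hidx, Option.map_some, Option.getD_some, List.take_succ_cons, cofBullets_cons]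
        by_cases h1 : PySem.Str.strip l = "2) Observed facts"
        · rw [show cofLoopA (l :: rest) true c = cofLoopA rest true c by simp [cofLoopA, h1],
            ih, hidx, h1]
          simp
          decide
        · rw [show cofLoopA (l :: rest) true c =
              (if PySem.Str.startswith (PySem.Str.strip l) "- " then cofLoopA rest true (c + 1)
               else cofLoopA rest true c) by
            simp only [cofLoopA, h1, if_false, h2]
            split_ifs <;> simp_all]
          split_ifs with hb <;> rw [ih, hidx] <;> simp [hb] <;> ring

-- pre-start phase: A from state false computes B's boundary-and-slice value
lemma cofLoopA_false (ls : List String) :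
    cofLoopA ls false 0 = cofAltCore (ls.map PySem.Str.strip) := by
  induction ls with
  | nil => simp [cofLoopA, cofAltCore, PySem.List.index?]
  | cons l rest ih =>
    by_cases h1 : PySem.Str.strip l = "2) Observed facts"
    · rw [show cofLoopA (l :: rest) false 0 = cofLoopA rest true 0 by simp [cofLoopA, h1],
        cofLoopA_true]
      simp only [cofAltCore, List.map_cons, h1]
      rw [PySem.List.index?_cons_self]
      simp
    · rw [show cofLoopA (l :: rest) false 0 = cofLoopA rest false 0 by simp [cofLoopA, h1],
        ih]
      simp only [cofAltCore, List.map_cons]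
      rw [PySem.List.index?_cons_of_ne _ h1]
      cases hidx : PySem.List.index? (rest.map PySem.Str.strip) "2) Observed facts" with
      | none => rfl
      | some k => simp

-- ===== VERDICT (by name: the statement is the Claim_ definition above) =====
theorem count_observed_facts_spec : Claim_equal_count_observed_facts := by
  intro r _
  unfold Spec_count_observed_facts count_observed_facts
  rw [alt_eq_core, cofLoopA_false]
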